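-- pv_equiv track=rewrite | github.com/karthikshivaram24/Information-Retrieval---Assigments | a1/searcher.py | create_champion_index
-- ===== SOURCE A (Python) =====
-- def create_champion_index(index, threshold=10):
--     """
--     Create an index mapping each term to its champion list, defined as the
--     documents with the K highest tf-idf values for that term (the
--     threshold parameter determines K).
--
--     In the example below, the champion list for term 'a' contains
--     documents 1 and 2; the champion list for term 'b' contains documents 0
--     and 1.
--
--     >>> champs = Index().create_champion_index({'a': [[0, 10], [1, 20], [2,15]], 'b': [[0, 20], [1, 15], [2, 10]]}, 2)
--     >>> champs['a']
--     [[1, 20], [2, 15]]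
--     """
--     ###TODO
--     pass
--
--     champion_index = {}
--
--     for term in index:
--         list_pair = index[term]
--         sorted_list_pair = sorted(list_pair, key= lambda list: list[1] , reverse = True)
--         champion_index[term] = sorted_list_pair[:threshold]
--
--     return champion_index
-- ===== SOURCE B (Python) =====
-- def _insert_desc(doc, top):
--     """Insert doc into top (kept sorted by descending tf-idf), after any ties."""
--     if top and top[0][1] >= doc[1]:
--         return [top[0]] + _insert_desc(doc, top[1:])
--     return [doc] + top
--
--
-- def create_champion_index(index, threshold=10):
--     champion_index = {}
--     for term, postings in index.items():
--         top = []  # at most `threshold` champions, descending tf-idf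
--         for doc in postings:
--             top = _insert_desc(doc, top)
--             if len(top) > threshold:
--                 top.pop()
--         champion_index[term] = top
--     return champion_index
-- ===== Notes on version B (the rewrite author's own statement) =====
-- stated objective: alternative
-- what changed: Replaces A's per-term full sort + slice by a streaming bounded insertion buffer that keeps only the current top-K champions (insert after ties, drop the weakest when over capacity).
-- intended difference: For a negative threshold on an index where some term has more than |threshold| postings, A's slice [:threshold] returns all but the last |threshold| documents of the sorted list, while B returns the intended empty champion list (a champion list of negative size holds no documents). — e.g. on create_champion_index([("a", [[0, 10], [1, 20]])], -1): A returns [("a", [[1, 20]])], B returns [("a", [])]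
import Mathlib
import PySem

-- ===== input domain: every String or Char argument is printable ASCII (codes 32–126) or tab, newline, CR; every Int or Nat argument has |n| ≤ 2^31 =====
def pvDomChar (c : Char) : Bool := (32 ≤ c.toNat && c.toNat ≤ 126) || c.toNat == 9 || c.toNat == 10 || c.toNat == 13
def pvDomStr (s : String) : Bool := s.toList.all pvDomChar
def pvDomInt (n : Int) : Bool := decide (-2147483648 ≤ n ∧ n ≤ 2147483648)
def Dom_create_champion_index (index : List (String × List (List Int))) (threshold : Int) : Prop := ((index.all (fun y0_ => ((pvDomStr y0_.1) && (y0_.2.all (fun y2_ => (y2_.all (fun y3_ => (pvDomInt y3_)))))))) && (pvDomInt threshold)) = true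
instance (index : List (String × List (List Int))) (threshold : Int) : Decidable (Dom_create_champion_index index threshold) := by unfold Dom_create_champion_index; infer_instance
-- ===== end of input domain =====

-- B replaces A's full sort-then-slice per term by a streaming bounded insertion buffer that keeps
-- only the current champions; for a negative threshold B returns the intended empty champion list
-- where A's negative slice accidentally keeps all but the last |threshold| documents (see D_ below).

-- ===== PORT A =====
-- key = lambda list: list[1]; Python raises IndexError on an inner list of length < 2 — those
-- inputs are excluded by Pre_, so the default 0 of pyGetD is never the value used.
def create_champion_index (index : List (String × List (List Int))) (threshold : Int) : List (String × List (List Int)) :=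
  index.foldl (fun champion_index p =>
    -- 'for term in index' iterates the dict's keys; 'index[term]' is a lookup (first match);
    -- a dict's keys are distinct (Pre_), so the lookup always succeeds and .getD [] never fires
    let term := p.1
    let list_pair := (PySem.Dict.get? ⟨index⟩ term).getD []
    let sorted_list_pair := PySem.List.sorted list_pair (fun l => PySem.List.pyGetD l 1 0) true
    (PySem.Dict.insert ⟨champion_index⟩ term (PySem.List.slice sorted_list_pair none (some threshold))).items) []

-- ===== PORT B =====
-- _insert_desc(doc, top): insert doc into the descending buffer, after any ties
def pvInsertDesc (doc : List Int) (top : List (List Int)) : List (List Int) :=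
  match top with
  | [] => [doc]
  | h :: t =>
      if PySem.List.pyGetD doc 1 0 ≤ PySem.List.pyGetD h 1 0 then h :: pvInsertDesc doc t
      else doc :: h :: t

def create_champion_index_alt (index : List (String × List (List Int))) (threshold : Int) : List (String × List (List Int)) :=
  index.foldl (fun champion_index p =>
    let top := p.2.foldl (fun top doc =>
      let top' := pvInsertDesc doc top
      -- if len(top) > threshold: top.pop()
      if threshold < (top'.length : Int) then top'.dropLast else top') []
    (PySem.Dict.insert ⟨champion_index⟩ p.1 top).items) []

-- ===== PRECONDITION & SPEC =====
-- Pre_ excludes inner postings of length < 2 (there A raises IndexError on list[1]) and assoc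
-- lists with duplicate term keys (not representable by a Python dict, which both versions take).
def Pre_create_champion_index (index : List (String × List (List Int))) (threshold : Int) : Prop :=
  (index.map Prod.fst).Nodup ∧ ∀ p ∈ index, ∀ doc ∈ p.2, 2 ≤ doc.length
instance (index : List (String × List (List Int))) (threshold : Int) : Decidable (Pre_create_champion_index index threshold) := by unfold Pre_create_champion_index; infer_instance

def pvWitness_create_champion_index : (List (String × List (List Int))) × Int :=
  ([("a", [[0, 10], [1, 20], [2, 15]]), ("b", [[0, 20], [1, 15], [2, 10]])], 2)

-- For a negative threshold on an index with some postings list longer than |threshold|, A's slice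
-- [:threshold] accidentally returns all but the last |threshold| documents of the sorted list,
-- while B returns the intended empty champion list (a champion list of negative size has no docs).
def D_create_champion_index (index : List (String × List (List Int))) (threshold : Int) : Prop :=
  threshold < 0 ∧ ∃ p ∈ index, 0 < (p.2.length : Int) + threshold
instance (index : List (String × List (List Int))) (threshold : Int) : Decidable (D_create_champion_index index threshold) := by unfold D_create_champion_index; infer_instance

def Spec_create_champion_index (index : List (String × List (List Int))) (threshold : Int) (out : List (String × List (List Int))) : Prop := ¬ D_create_champion_index index threshold → out = create_champion_index_alt index threshold
instance (index : List (String × List (List Int))) (threshold : Int) (out : List (String × List (List Int))) : Decidable (Spec_create_champion_index index threshold out) := by unfold Spec_create_champion_index; infer_instance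

def pvDiffWitness_create_champion_index : (List (String × List (List Int))) × Int :=
  ([("a", [[0, 10], [1, 20]])], -1)
def pvDiffWitnessOut_create_champion_index : (List (String × List (List Int))) × (List (String × List (List Int))) :=
  ([("a", [[1, 20]])], [("a", [])])

-- ===== CLAIM (what is proved, stated in full; the proofs are below) =====
def Claim_unchanged_create_champion_index : Prop := ∀ (index : List (String × List (List Int))) (threshold : Int), Dom_create_champion_index index threshold → Pre_create_champion_index index threshold → Spec_create_champion_index index threshold (create_champion_index index threshold)
def Claim_changed_create_champion_index : Prop := Dom_create_champion_index (pvDiffWitness_create_champion_index.1) (pvDiffWitness_create_champion_index.2) ∧ Pre_create_champion_index (pvDiffWitness_create_champion_index.1) (pvDiffWitness_create_champion_index.2) ∧ D_create_champion_index (pvDiffWitness_create_champion_index.1) (pvDiffWitness_create_champion_index.2) ∧ create_champion_index (pvDiffWitness_create_champion_index.1) (pvDiffWitness_create_champion_index.2) = pvDiffWitnessOut_create_champion_index.1 ∧ create_champion_index_alt (pvDiffWitness_create_champion_index.1) (pvDiffWitness_create_champion_index.2) = pvDiffWitnessOut_create_champion_index.2 ∧ pvDiffWitnessOut_create_champion_index.1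 ≠ pvDiffWitnessOut_create_champion_index.2
def Claim_exact_create_champion_index : Prop := ∀ (index : List (String × List (List Int))) (threshold : Int), Dom_create_champion_index index threshold → Pre_create_champion_index index threshold → D_create_champion_index index threshold → create_champion_index index threshold ≠ create_champion_index_alt index threshold

-- ===== LEMMAS AND PROOFS =====

-- B's hand-written insertion is PySem's insertBy with the reverse-stable comparator
lemma pvInsertDesc_eq_insertBy (doc : List Int) (top : List (List Int)) :
    pvInsertDesc doc top
      = PySem.List.insertBy (fun a b => decide (PySem.List.pyGetD b 1 0 < PySem.List.pyGetD a 1 0)) doc top := by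
  induction top with
  | nil => rfl
  | cons h t ih =>
      simp only [pvInsertDesc, PySem.List.insertBy, ih]
      by_cases hc : PySem.List.pyGetD doc 1 0 ≤ PySem.List.pyGetD h 1 0
      · simp [hc, not_lt.mpr hc]
      · simp [hc, lt_of_not_ge hc]

lemma length_insertBy {α : Type} (bf : α → α → Bool) (x : α) (l : List α) :
    (PySem.List.insertBy bf x l).length = l.length + 1 := by
  induction l with
  | nil => rfl
  | cons h t ih => simp only [PySem.List.insertBy]; split <;> simp [ih]

lemma take_insertBy {α : Type} (bf : α → α → Bool) (x : α) :
    ∀ (l : List α) (k : Nat), ((PySem.List.insertBy bf x (l.take k)).take k) = (PySem.List.insertBy bf x l).take k := by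
  intro l
  induction l with
  | nil => intro k; simp
  | cons h t ih =>
      intro k
      cases k with
      | zero => simp
      | succ m =>
          simp only [List.take_succ_cons, PySem.List.insertBy]
          split
          · cases m with
            | zero => simp
            | succ j =>
                simp only [List.take_succ_cons, List.cons.injEq, true_and, List.take_take]
                congr 1
                omega
          · simp only [List.take_succ_cons, List.cons.injEq, true_and]
            exact ih m

-- one trimmed step equals 'insert then keep the first k'
lemma trim_take {α : Type} (k : Nat) (l : List α) (hl : l.length ≤ k + 1) :
    (if (k : Int) < (l.length : Int) then l.dropLast else l) = l.take k := by
  by_cases h : (k : Int) < (l.length : Int)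
  · have hk : l.length = k + 1 := by omega
    simp [List.dropLast_eq_take, hk]
  · have : l.length ≤ k := by omega
    simp [h, List.take_of_length_le this]

-- the trimmed fold computes the first k elements of the untrimmed (full insertion-sort) fold
lemma fold_trim (k : Nat) (bf : List Int → List Int → Bool) :
    ∀ (ps : List (List Int)) (full : List (List Int)),
      ps.foldl (fun top doc =>
          let top' := PySem.List.insertBy bf doc top
          if (k : Int) < (top'.length : Int) then top'.dropLast else top') (full.take k)
        = (ps.foldl (fun top doc => PySem.List.insertBy bf doc top) full).take k := by
  intro ps
  induction ps with
  | nil => intro full; simp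
  | cons doc rest ih =>
      intro full
      simp only [List.foldl_cons]
      have hlen : (PySem.List.insertBy bf doc (full.take k)).length ≤ k + 1 := by
        rw [length_insertBy]
        have := List.length_take_le k full
        omega
      rw [trim_take k _ hlen, take_insertBy]
      exact ih (PySem.List.insertBy bf doc full)

-- first-match lookup on a duplicate-free association list finds the pair itself
lemma find_fst_nodup (index : List (String × List (List Int))) (p : String × List (List Int))
    (hnd : (index.map Prod.fst).Nodup) (hp : p ∈ index) :
    index.find? (fun q => q.1 == p.1) = some p := by
  induction index with
  | nil => cases hp
  | cons q rest ih =>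
      simp only [List.map_cons, List.nodup_cons] at hnd
      rcases List.mem_cons.mp hp with rfl | hmem
      · simp
      · have hne : (q.1 == p.1) = false := by
          simp only [beq_eq_false_iff_ne, ne_eq]
          intro h; exact hnd.1 (h ▸ List.mem_map_of_mem hmem)
        rw [List.find?_cons, hne]
        exact ih hnd.2 hmem

-- B's per-term buffer for a negative threshold is empty
lemma fold_neg (threshold : Int) (hneg : threshold < 0) (ps : List (List Int)) :
    ps.foldl (fun top doc =>
        let top' := pvInsertDesc doc top
        if threshold < (top'.length : Int) then top'.dropLast else top') []
      = [] := by
  induction ps with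
  | nil => rfl
  | cons doc rest ih =>
      simp only [List.foldl_cons]
      have h1 : (pvInsertDesc doc []).length = 1 := rfl
      have : threshold < ((pvInsertDesc doc []).length : Int) := by rw [h1]; omega
      simpa [this] using ih

-- A's per-term slice for a negative threshold that reaches no document is empty
lemma slice_neg_empty (xs : List (List Int)) (threshold : Int) (hneg : threshold < 0)
    (hlen : (xs.length : Int) + threshold ≤ 0) :
    PySem.List.slice xs none (some threshold) = [] := by
  have h0 : (xs.length : Int) + threshold < 0 ∨ (xs.length : Int) + threshold = 0 := by omega
  simp only [PySem.List.slice, PySem.List.clampIdx, if_pos hneg]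
  rcases h0 with h | h
  · simp [if_pos h]
  · rw [if_neg (by omega)]
    simp [h]

-- per-term equality for a non-negative threshold: sort-then-slice = streaming bounded buffer
lemma per_term_eq (threshold : Int) (h0 : 0 ≤ threshold) (ps : List (List Int)) :
    PySem.List.slice (PySem.List.sorted ps (fun l => PySem.List.pyGetD l 1 0) true) none (some threshold)
      = ps.foldl (fun top doc =>
          let top' := pvInsertDesc doc top
          if threshold < (top'.length : Int) then top'.dropLast else top') [] := by
  rw [PySem.List.slice_to _ h0]
  have hsort := PySem.List.sorted_rev_eq_foldl_insertBy ps (fun l => PySem.List.pyGetD l 1 0)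
  rw [hsort]
  have hb : ∀ (top : List (List Int)) (doc : List Int),
      pvInsertDesc doc top
        = PySem.List.insertBy (fun a b => decide (PySem.List.pyGetD b 1 0 < PySem.List.pyGetD a 1 0)) doc top :=
    fun top doc => pvInsertDesc_eq_insertBy doc top
  have hth : threshold = ((threshold.toNat : Nat) : Int) := by omega
  have hk := fold_trim threshold.toNat (fun a b => decide (PySem.List.pyGetD b 1 0 < PySem.List.pyGetD a 1 0)) ps []
  rw [List.take_nil] at hk
  rw [← hk]
  exact (PySem.List.foldl_congr_mem _ _ _ _ (fun acc x _ => by simp only [hb, ← hth])).symm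

-- ===== VERDICT (by name: the statement is the Claim_ definition above) =====
-- the key of each pair looks itself up (duplicate-free keys)
lemma get_self (index : List (String × List (List Int))) (p : String × List (List Int))
    (hnd : (index.map Prod.fst).Nodup) (hp : p ∈ index) :
    PySem.Dict.get? (⟨index⟩ : PySem.Dict String (List (List Int))) p.1 = some p.2 := by
  simp only [PySem.Dict.get?]
  rw [find_fst_nodup index p hnd hp]
  rfl

theorem create_champion_index_spec : Claim_unchanged_create_champion_index := by
  intro index threshold _hdom hpre hnD
  obtain ⟨hnd, _hlen2⟩ := hpre
  unfold create_champion_index create_champion_index_alt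
  apply PySem.List.foldl_congr_mem
  intro acc p hp
  simp only [get_self index p hnd hp, Option.getD_some]
  refine congrArg (fun v => (PySem.Dict.insert (⟨acc⟩ : PySem.Dict String (List (List Int))) p.1 v).items) ?_
  by_cases h0 : 0 ≤ threshold
  · exact per_term_eq threshold h0 p.2
  · have hneg : threshold < 0 := by omega
    have hsm : (p.2.length : Int) + threshold ≤ 0 := by
      unfold D_create_champion_index at hnD
      push_neg at hnD
      have := hnD hneg p hp
      omega
    rw [fold_neg threshold hneg]
    exact slice_neg_empty _ _ hneg (by rw [PySem.List.length_sorted]; exact hsm)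

theorem create_champion_index_changed : Claim_changed_create_champion_index := by
  unfold Claim_changed_create_champion_index; decide

-- the dict-building fold over distinct keys is a map (every insert appends a fresh key)
lemma build_map (v : String × List (List Int) → List (List Int)) :
    ∀ (rest acc : List (String × List (List Int))),
      ((acc ++ rest).map Prod.fst).Nodup →
      rest.foldl (fun champ p => (PySem.Dict.insert ⟨champ⟩ p.1 (v p)).items) acc
        = acc ++ rest.map (fun p => (p.1, v p)) := by
  intro rest
  induction rest with
  | nil => intro acc _; simp
  | cons p rest' ih =>
      intro acc hnd
      have hfresh : p.1 ∉ acc.map Prod.fst := by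
        have hnd2 := hnd
        simp only [List.map_append, List.map_cons, List.nodup_append] at hnd2
        intro hmem
        exact hnd2.2.2 p.1 hmem p.1 (List.mem_cons_self) rfl
      have hcon : PySem.Dict.contains (⟨acc⟩ : PySem.Dict String (List (List Int))) p.1 = false := by
        simp only [PySem.Dict.contains, PySem.Dict.items, List.any_eq_false]
        intro q hq h
        exact hfresh (eq_of_beq h ▸ List.mem_map_of_mem hq)
      have hstep : (PySem.Dict.insert (⟨acc⟩ : PySem.Dict String (List (List Int))) p.1 (v p)).items
          = acc ++ [(p.1, v p)] := by
        simp [PySem.Dict.insert, hcon]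
      have hnd' : (((acc ++ [(p.1, v p)]) ++ rest').map Prod.fst).Nodup := by
        have e1 : ((acc ++ [(p.1, v p)]) ++ rest').map Prod.fst
            = acc.map Prod.fst ++ p.1 :: rest'.map Prod.fst := by simp
        have e2 : (acc ++ p :: rest').map Prod.fst
            = acc.map Prod.fst ++ p.1 :: rest'.map Prod.fst := by simp
        rw [e1, ← e2]
        exact hnd
      simp only [List.foldl_cons]
      rw [hstep, ih (acc ++ [(p.1, v p)]) hnd']
      simp

-- A's per-term slice for a negative threshold that still reaches a document is nonempty
lemma slice_neg_nonempty (xs : List (List Int)) (threshold : Int) (hneg : threshold < 0)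
    (hlong : 0 < (xs.length : Int) + threshold) :
    PySem.List.slice xs none (some threshold) ≠ [] := by
  apply List.ne_nil_of_length_pos
  simp only [PySem.List.slice, PySem.List.clampIdx, if_pos hneg,
    if_neg (show ¬((xs.length : Int) + threshold < 0) by omega), List.length_take, List.length_drop]
  omega

theorem create_champion_index_tight : Claim_exact_create_champion_index := by
  intro index threshold _hdom hpre hD heq
  obtain ⟨hnd, _hlen2⟩ := hpre
  obtain ⟨hneg, q, hq, hlong⟩ := hD
  have hA : create_champion_index index threshold
      = index.map (fun p => (p.1, PySem.List.slice (PySem.List.sorted ((PySem.Dict.get? (⟨index⟩ : PySem.Dict String (List (List Int))) p.1).getD []) (fun l => PySem.List.pyGetD l 1 0) true) none (some threshold))) := by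
    unfold create_champion_index
    simpa using build_map _ index [] (by simpa using hnd)
  have hB : create_champion_index_alt index threshold
      = index.map (fun p => (p.1, ([] : List (List Int)))) := by
    unfold create_champion_index_alt
    have hbm := build_map (fun p => p.2.foldl (fun top doc =>
        let top' := pvInsertDesc doc top
        if threshold < (top'.length : Int) then top'.dropLast else top') []) index [] (by simpa using hnd)
    simp only [List.nil_append] at hbm
    rw [hbm]
    refine List.map_congr_left ?_
    intro p _
    simp [fold_neg threshold hneg]
  rw [hA, hB] at heq
  obtain ⟨i, hi, hqi⟩ := List.mem_iff_getElem.mp hq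
  have h1 := congrArg (fun l => l[i]?) heq
  simp only [List.getElem?_map, List.getElem?_eq_getElem hi, Option.map_some] at h1
  rw [hqi] at h1
  have h2 := (Prod.ext_iff.mp (Option.some.inj h1)).2
  rw [get_self index q hnd hq, Option.getD_some] at h2
  exact slice_neg_nonempty _ threshold hneg (by rw [PySem.List.length_sorted]; exact hlong) h2
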